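-- pv_equiv track=rewrite | github.com/NIKHILDUGAR/codewars4kyuSolutions | Repetitive Sequence.py | find
-- ===== SOURCE A (Python) =====
-- def find(n):
--     l=[0,1,2,2,3,3]
--     if n<3:
--         return l[n]
--     i=6
--     k=4
--     j=3
--     while i<=n:
--         for coun in range(j):
--             l.append(k)
--             if i==n:
--                 return l[n]
--             i+=1
--         k+=1
--         for coun in range(j):
--             l.append(k)
--             if i==n:
--                 return l[n]
--             i+=1
--         k+=1
--         j+=1
--     return l[n]
-- ===== SOURCE B (Python) =====
-- def find(n):
--     # Locate n directly: the sequence is 0,1,2,2,3,3,4,4,4,5,5,5,...  value v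
--     # first appears at index v//2*(v//2+1) resp. (v//2+1)^2, so with r = isqrt(n)
--     # the answer is 2r if n >= r*(r+1) else 2r-1.  O(sqrt n) instead of O(n).
--     r = 0
--     while (r + 1) * (r + 1) <= n:
--         r += 1
--     return 2 * r if n >= r * (r + 1) else 2 * r - 1
-- ===== Notes on version B (the rewrite author's own statement) =====
-- stated objective: faster
-- what changed: Replaces A's linear construction of the run-length sequence in a growing list with a direct arithmetic location of index n: an integer square root r = isqrt(n) (O(sqrt n) loop, no list) and the closed form 2r or 2r-1 depending on whether n >= r*(r+1).
-- outside the precondition, e.g. on find(-1): A returns 3, B returns -1; on find(-10): A raises IndexError, B returns -1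
import Mathlib
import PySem

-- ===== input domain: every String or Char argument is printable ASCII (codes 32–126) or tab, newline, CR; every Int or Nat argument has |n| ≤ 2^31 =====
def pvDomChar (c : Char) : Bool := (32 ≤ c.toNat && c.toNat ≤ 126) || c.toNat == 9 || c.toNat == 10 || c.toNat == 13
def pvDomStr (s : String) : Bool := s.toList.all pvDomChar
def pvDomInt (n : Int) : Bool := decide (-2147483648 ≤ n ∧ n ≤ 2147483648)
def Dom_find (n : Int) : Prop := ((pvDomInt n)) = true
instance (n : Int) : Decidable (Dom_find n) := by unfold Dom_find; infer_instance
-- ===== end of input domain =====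

-- B replaces A's O(n) list construction by an integer-square-root closed form (objective: faster, asymptotic).

-- ===== PORT A =====
-- 'for coun in range(j)' iterates j.toNat times (j ≥ 0 in every reachable call); early
-- 'return l[n]' is the Sum.inr case.  The growing list l is kept REVERSED (rl), so that
-- 'l.append(k)' is the O(1) cons 'k :: rl' as in Python, and each read 'l[n]' is
-- PySem.List.pyGet? rl.reverse n; '.getD 0' only fires where Python raises IndexError
-- (n < -6), which Pre_find excludes.
def findInner (rl : List Int) (i k n : Int) : Nat → (List Int × Int) ⊕ Int
  | 0 => Sum.inl (rl, i)
  | Nat.succ c =>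
    if i = n then Sum.inr ((PySem.List.pyGet? (k :: rl).reverse n).getD 0)
    else findInner (k :: rl) (i + 1) k n c

-- the 'while i <= n' loop; fuel only makes it total (each real iteration adds 2*j ≥ 6 to i)
def findOuter : Nat → List Int → Int → Int → Int → Int → Int
  | 0, rl, _, _, _, n => (PySem.List.pyGet? rl.reverse n).getD 0
  | Nat.succ f, rl, i, k, j, n =>
    if i ≤ n then
      match findInner rl i k n j.toNat with
      | Sum.inr v => v
      | Sum.inl (rl1, i1) =>
        match findInner rl1 i1 (k + 1) n j.toNat with
        | Sum.inr v => v
        | Sum.inl (rl2, i2) => findOuter f rl2 i2 (k + 2) (j + 1) n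
    else (PySem.List.pyGet? rl.reverse n).getD 0

def find (n : Int) : Int :=
  if n < 3 then (PySem.List.pyGet? [0, 1, 2, 2, 3, 3] n).getD 0
  else findOuter (n.toNat + 1) [3, 3, 2, 2, 1, 0] 6 4 3 n

-- ===== PORT B =====
-- the 'while (r+1)*(r+1) <= n: r += 1' loop of Source B
def altLoop (n r : Int) : Int :=
  if h : (r + 1) * (r + 1) ≤ n then altLoop n (r + 1) else r
termination_by (n - r).toNat
decreasing_by
  have : r < (r + 1) * (r + 1) := by nlinarith [sq_nonneg (2 * r + 1)]
  omega

def find_alt (n : Int) : Int :=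
  let r := altLoop n 0
  if n ≥ r * (r + 1) then 2 * r else 2 * r - 1

-- ===== PRECONDITION & SPEC =====
-- Pre_find excludes negative n, outside the sequence's natural index domain: there A raises
-- IndexError (n < -6) or returns an accidental negative-index wraparound value (-6 ≤ n ≤ -1),
-- while B returns -1.
def Pre_find (n : Int) : Prop := 0 ≤ n
instance (n : Int) : Decidable (Pre_find n) := by unfold Pre_find; infer_instance
def pvWitness_find : Int := 7
def Spec_find (n : Int) (out : Int) : Prop := out = find_alt n
instance (n : Int) (out : Int) : Decidable (Spec_find n out) := by unfold Spec_find; infer_instance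

-- ===== CLAIM (what is proved, stated in full; the proofs are below) =====
def Claim_equal_find : Prop := ∀ (n : Int), Dom_find n → Pre_find n → Spec_find n (find n)

-- ===== LEMMAS AND PROOFS =====

lemma altLoop_eq (n s : Int) (hs : s * s ≤ n) (hs1 : n < (s + 1) * (s + 1)) :
    ∀ (m : Nat) (r : Int), 0 ≤ r → r ≤ s → (s - r).toNat = m → altLoop n r = s := by
  intro m
  induction m with
  | zero =>
    intro r h0 hrs hm
    have : r = s := by omega
    subst this
    rw [altLoop, dif_neg (by omega)]
  | succ m ih =>
    intro r h0 hrs hm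
    have hlt : r < s := by omega
    have hg : (r + 1) * (r + 1) ≤ n := by nlinarith
    rw [altLoop, dif_pos hg]
    exact ih (r + 1) (by omega) (by omega) (by omega)

lemma find_alt_eq (n s : Int) (h0 : 0 ≤ s) (hs : s * s ≤ n) (hs1 : n < (s + 1) * (s + 1)) :
    find_alt n = if n ≥ s * (s + 1) then 2 * s else 2 * s - 1 := by
  unfold find_alt
  rw [altLoop_eq n s hs hs1 (s - 0).toNat 0 le_rfl h0 rfl]

lemma inner_ret : ∀ (c : Nat) (rl : List Int) (i k n : Int),
    rl.length = i.toNat → 0 ≤ i → i ≤ n → n < i + c →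
    findInner rl i k n c = Sum.inr k := by
  intro c
  induction c with
  | zero => intro rl i k n _ _ _ h; omega
  | succ c ih =>
    intro rl i k n hlen h0 hin hn
    by_cases h : i = n
    · subst h
      rw [findInner, if_pos rfl]
      have hl : (rl.reverse.length : Int) = i := by simp; omega
      have : PySem.List.pyGet? (k :: rl).reverse i = some k := by
        rw [List.reverse_cons, ← hl]; exact PySem.List.pyGet?_append_length rl.reverse [] k
      rw [this]; rfl
    · rw [findInner, if_neg h]
      exact ih (k :: rl) (i + 1) k n (by simp; omega) (by omega) (by omega) (by omega)

lemma inner_cont : ∀ (c : Nat) (rl : List Int) (i k n : Int), i + c ≤ n →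
    findInner rl i k n c = Sum.inl (List.replicate c k ++ rl, i + c) := by
  intro c
  induction c with
  | zero => intro rl i k n _; simp [findInner]
  | succ c ih =>
    intro rl i k n h
    rw [findInner, if_neg (by omega)]
    rw [ih (k :: rl) (i + 1) k n (by omega)]
    simp [List.replicate_succ', List.append_assoc]
    omega

lemma outer_eq : ∀ (fuel : Nat) (rl : List Int) (i k j n : Int),
    3 ≤ j → i = j * j - j → k = 2 * j - 2 → i ≤ n → rl.length = i.toNat →
    (n - i).toNat < fuel →
    findOuter fuel rl i k j n = find_alt n := by
  intro fuel
  induction fuel with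
  | zero => intro rl i k j n _ _ _ _ _ h; omega
  | succ f ih =>
    intro rl i k j n hj hi hk hin hlen hfuel
    have h0i : 0 ≤ i := by nlinarith
    have hc : (j.toNat : Int) = j := by omega
    rw [findOuter, if_pos hin]
    by_cases h1 : n < i + j
    · rw [inner_ret j.toNat rl i k n hlen h0i hin (by omega)]
      dsimp only
      rw [find_alt_eq n (j - 1) (by omega) (by nlinarith) (by nlinarith)]
      rw [if_pos (by nlinarith)]
      omega
    · rw [inner_cont j.toNat rl i k n (by omega)]
      dsimp only
      by_cases h2 : n < i + 2 * j
      · rw [inner_ret j.toNat (List.replicate j.toNat k ++ rl) (i + (j.toNat : Int)) (k + 1) n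
          (by simp [hlen]; omega) (by omega) (by omega) (by omega)]
        dsimp only
        rw [find_alt_eq n j (by omega) (by nlinarith) (by nlinarith)]
        rw [if_neg (by nlinarith)]
        omega
      · rw [inner_cont j.toNat (List.replicate j.toNat k ++ rl) (i + (j.toNat : Int)) (k + 1) n
          (by omega)]
        dsimp only
        rw [ih _ _ (k + 2) (j + 1) n (by omega) (by push_cast [hc]; nlinarith) (by omega)
          (by omega) (by simp [hlen]; omega) (by omega)]

lemma find_alt_small : ∀ n : Int, 0 ≤ n → n < 6 →
    find_alt n = (PySem.List.pyGet? [0, 1, 2, 2, 3, 3] n).getD 0 := by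
  intro n h0 h6
  interval_cases n
  · rw [find_alt_eq 0 0 (by norm_num) (by norm_num) (by norm_num)]; norm_num
  · rw [find_alt_eq 1 1 (by norm_num) (by norm_num) (by norm_num)]; decide
  · rw [find_alt_eq 2 1 (by norm_num) (by norm_num) (by norm_num)]; decide
  · rw [find_alt_eq 3 1 (by norm_num) (by norm_num) (by norm_num)]; decide
  · rw [find_alt_eq 4 2 (by norm_num) (by norm_num) (by norm_num)]; decide
  · rw [find_alt_eq 5 2 (by norm_num) (by norm_num) (by norm_num)]; decide

-- ===== VERDICT (by name: the statement is the Claim_ definition above) =====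
theorem find_spec : Claim_equal_find := by
  intro n _ hpre
  unfold Spec_find find
  have h0 : 0 ≤ n := hpre
  by_cases h3 : n < 3
  · rw [if_pos h3, find_alt_small n h0 (by omega)]
  · rw [if_neg h3]
    by_cases h6 : n < 6
    · rw [show n.toNat + 1 = Nat.succ n.toNat from rfl, findOuter, if_neg (by omega)]
      rw [find_alt_small n h0 h6]; rfl
    · exact outer_eq (n.toNat + 1) _ 6 4 3 n (by norm_num) (by norm_num) (by norm_num)
        (by omega) (by decide) (by omega)
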